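-- pv_equiv track=rewrite | github.com/avickars/mosscanvasgui | moss/courses/CMPT310_D100_Artificial_Intelligence_Survey/Assignment_1/submissions/Manqing_Zhu/a1.py | swap_first_two_nonzero
-- ===== SOURCE A (Python) =====
-- def swap_first_two_nonzero(target_list):
--     for i in range(len(target_list)):
--         if(target_list[i] == 0):
--             continue
--         for j in range(i+1, len(target_list)):
--             if(target_list[j] == 0):
--                 continue
--             target_list[i], target_list[j] = target_list[j], target_list[i]
--             return target_list
--     return []
-- ===== SOURCE B (Python) =====
-- def swap_first_two_nonzero(target_list):
--     idx = [k for k, v in enumerate(target_list) if v != 0]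
--     if len(idx) >= 2:
--         i, j = idx[0], idx[1]
--         target_list[i], target_list[j] = target_list[j], target_list[i]
--         return target_list
--     return []
-- ===== Notes on version B (the rewrite author's own statement) =====
-- stated objective: simpler
-- what changed: Replaces the nested index scan with early return by one comprehension gathering all nonzero indices followed by a single constant-shaped swap/branch.
import Mathlib
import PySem

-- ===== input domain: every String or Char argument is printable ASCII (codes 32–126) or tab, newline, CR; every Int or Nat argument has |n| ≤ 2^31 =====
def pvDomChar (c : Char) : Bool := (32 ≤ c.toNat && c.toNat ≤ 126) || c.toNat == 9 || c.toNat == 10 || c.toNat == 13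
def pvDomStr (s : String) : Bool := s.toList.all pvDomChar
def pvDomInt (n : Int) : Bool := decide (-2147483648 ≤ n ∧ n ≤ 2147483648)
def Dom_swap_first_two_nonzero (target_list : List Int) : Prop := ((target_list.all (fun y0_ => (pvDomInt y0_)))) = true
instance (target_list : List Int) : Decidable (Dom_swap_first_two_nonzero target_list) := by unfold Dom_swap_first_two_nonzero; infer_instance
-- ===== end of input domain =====

-- B gathers the nonzero indices in one comprehension and swaps the first two, instead of A's
-- nested scan with early return; same return value everywhere (equivalence is about the return
-- value; both Pythons mutate the argument identically, only in the swap case).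

-- ===== PORT A =====
-- inner loop 'for j in range(i+1, len): …' as a recursion returning the index j where the
-- early swap fires (some j) or none when the loop falls through; indices are always in range,
-- so getD is exact.
def swapInnerA (l : List Int) (j : Nat) : Option Nat :=
  if _h : j < l.length then
    if l.getD j 0 = 0 then swapInnerA l (j + 1) else some j
  else none
termination_by l.length - j

-- outer loop 'for i in range(len): …'
def swapOuterA (l : List Int) (i : Nat) : List Int :=
  if _h : i < l.length then
    if l.getD i 0 = 0 then swapOuterA l (i + 1)
    else
      match swapInnerA l (i + 1) with
      | some j => (l.set i (l.getD j 0)).set j (l.getD i 0)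
      | none => swapOuterA l (i + 1)
  else []
termination_by l.length - i

def swap_first_two_nonzero (target_list : List Int) : List Int :=
  swapOuterA target_list 0

-- ===== PORT B =====
def swap_first_two_nonzero_alt (target_list : List Int) : List Int :=
  let idx := ((PySem.List.enumerate target_list).filter (fun kv => decide (kv.2 ≠ 0))).map Prod.fst
  if 2 ≤ idx.length then
    let i := PySem.List.pyGetD idx 0 0
    let j := PySem.List.pyGetD idx 1 0
    PySem.List.pySetD (PySem.List.pySetD target_list i (PySem.List.pyGetD target_list j 0)) j
      (PySem.List.pyGetD target_list i 0)
  else []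

-- ===== PRECONDITION & SPEC =====
def Spec_swap_first_two_nonzero (target_list : List Int) (out : List Int) : Prop := out = swap_first_two_nonzero_alt target_list
instance (target_list : List Int) (out : List Int) : Decidable (Spec_swap_first_two_nonzero target_list out) := by unfold Spec_swap_first_two_nonzero; infer_instance

-- ===== CLAIM (what is proved, stated in full; the proofs are below) =====
def Claim_equal_swap_first_two_nonzero : Prop := ∀ (target_list : List Int), Dom_swap_first_two_nonzero target_list → Spec_swap_first_two_nonzero target_list (swap_first_two_nonzero target_list)

-- ===== LEMMAS AND PROOFS =====

/-- The ascending list of indices of nonzero elements. -/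
def nzIdx : List Int → List Nat
  | [] => []
  | x :: xs => if x = 0 then (nzIdx xs).map (· + 1) else 0 :: (nzIdx xs).map (· + 1)

theorem swapInnerA_eq (l : List Int) (j : Nat) :
    swapInnerA l j =
      if j < l.length then (if l.getD j 0 = 0 then swapInnerA l (j + 1) else some j)
      else none := by
  rw [swapInnerA]
  split <;> simp_all

theorem swapOuterA_eq (l : List Int) (i : Nat) :
    swapOuterA l i =
      if i < l.length then
        (if l.getD i 0 = 0 then swapOuterA l (i + 1)
         else
           match swapInnerA l (i + 1) with
           | some j => (l.set i (l.getD j 0)).set j (l.getD i 0)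
           | none => swapOuterA l (i + 1))
      else [] := by
  rw [swapOuterA]
  split <;> simp_all

theorem swapInnerA_shift (xs : List Int) (x : Int) (j : Nat) :
    swapInnerA (x :: xs) (j + 1) = (swapInnerA xs j).map (· + 1) := by
  induction' hn : xs.length - j using Nat.strong_induction_on with n IH generalizing j
  rw [swapInnerA_eq (x :: xs) (j + 1), swapInnerA_eq xs j]
  by_cases h : j < xs.length
  · rw [if_pos (by simp; omega), if_pos h]
    simp only [List.getD_cons_succ]
    by_cases hz : xs.getD j 0 = 0
    · rw [if_pos hz, if_pos hz]
      exact IH (xs.length - (j + 1)) (by omega) (j + 1) rfl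
    · rw [if_neg hz, if_neg hz]
      rfl
  · rw [if_neg (by simp; omega), if_neg h]
    rfl

theorem swapInnerA_zero_cons (xs : List Int) (x : Int) :
    swapInnerA (x :: xs) 0 = if x = 0 then (swapInnerA xs 0).map (· + 1) else some 0 := by
  rw [swapInnerA_eq]
  simp only [List.length_cons, Nat.succ_pos, if_pos, List.getD_cons_zero]
  by_cases hz : x = 0
  · simp [hz, swapInnerA_shift]
  · simp [hz]

/-- `swapInnerA` finds successive elements of `nzIdx`. -/
theorem swapInnerA_nzIdx (l : List Int) :
    match nzIdx l with
    | i :: j :: _ => swapInnerA l 0 = some i ∧ swapInnerA l (i + 1) = some j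
    | [i] => swapInnerA l 0 = some i ∧ swapInnerA l (i + 1) = none
    | [] => swapInnerA l 0 = none := by
  induction l with
  | nil => simp [nzIdx, swapInnerA_eq]
  | cons x xs ih =>
    by_cases hz : x = 0
    · simp only [nzIdx, if_pos hz]
      rcases hxs : nzIdx xs with _ | ⟨i, _ | ⟨j, rest⟩⟩ <;>
        rw [hxs] at ih <;>
        simp_all [swapInnerA_zero_cons, swapInnerA_shift]
    · simp only [nzIdx, if_neg hz]
      rcases hxs : nzIdx xs with _ | ⟨i, _ | ⟨j, rest⟩⟩ <;>
        rw [hxs] at ih <;>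
        simp_all [swapInnerA_zero_cons, swapInnerA_shift]

theorem swapOuterA_of_inner_none (l : List Int) (i : Nat)
    (h : swapInnerA l i = none) : swapOuterA l i = [] := by
  induction' hn : l.length - i using Nat.strong_induction_on with n IH generalizing i
  rw [swapOuterA_eq]
  by_cases hi : i < l.length
  · rw [swapInnerA_eq] at h
    rw [if_pos hi] at h ⊢
    by_cases hz : l.getD i 0 = 0
    · rw [if_pos hz] at h ⊢
      exact IH (l.length - (i + 1)) (by omega) (i + 1) h rfl
    · rw [if_neg hz] at h
      exact absurd h (by simp)
  · rw [if_neg hi]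

/-- `swapOuterA` in terms of `swapInnerA`. -/
theorem swapOuterA_char (l : List Int) (i : Nat) :
    swapOuterA l i =
      match swapInnerA l i with
      | none => []
      | some k =>
        match swapInnerA l (k + 1) with
        | none => []
        | some j => (l.set k (l.getD j 0)).set j (l.getD k 0) := by
  induction' hn : l.length - i using Nat.strong_induction_on with n IH generalizing i
  rw [swapOuterA_eq]
  by_cases hi : i < l.length
  · rw [if_pos hi]
    by_cases hz : l.getD i 0 = 0
    · have hIA : swapInnerA l i = swapInnerA l (i + 1) := by
        rw [swapInnerA_eq, if_pos hi, if_pos hz]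
      rw [if_pos hz, hIA]
      exact IH (l.length - (i + 1)) (by omega) (i + 1) rfl
    · have hIA : swapInnerA l i = some i := by
        rw [swapInnerA_eq, if_pos hi, if_neg hz]
      rw [if_neg hz, hIA]
      rcases hin : swapInnerA l (i + 1) with _ | j
      · simp [hin, swapOuterA_of_inner_none l (i + 1) hin]
      · simp [hin]
  · have hIA : swapInnerA l i = none := by
      rw [swapInnerA_eq, if_neg hi]
    rw [if_neg hi, hIA]

/-- B's comprehension computes `nzIdx` (shifted by the enumerate start). -/
theorem enum_filter_nzIdx (l : List Int) (s : Int) :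
    ((PySem.List.enumerate l s).filter (fun kv => decide (kv.2 ≠ 0))).map Prod.fst
      = (nzIdx l).map (fun (k : Nat) => s + (k : Int)) := by
  induction l generalizing s with
  | nil => simp [PySem.List.enumerate_nil, nzIdx]
  | cons x xs ih =>
    rw [PySem.List.enumerate_cons, nzIdx]
    have ih' := ih (s + 1)
    simp only [ne_eq, decide_not] at ih' ⊢
    by_cases hz : x = 0
    · rw [if_pos hz]
      simp only [List.filter_cons, hz, decide_true, Bool.not_true, Bool.false_eq_true,
        if_false, ih', List.map_map, Function.comp_def]
      apply List.map_congr_left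
      intro k _
      push_cast
      ring
    · rw [if_neg hz]
      simp only [List.filter_cons, hz, decide_false, Bool.not_false, if_true,
        List.map_cons, ih', List.map_map, Function.comp_def, Nat.cast_zero, add_zero,
        List.cons.injEq, true_and]
      apply List.map_congr_left
      intro k _
      push_cast
      ring

theorem swap_main (l : List Int) :
    swap_first_two_nonzero l = swap_first_two_nonzero_alt l := by
  have hB := enum_filter_nzIdx l 0
  have hA := swapInnerA_nzIdx l
  rw [swap_first_two_nonzero, swap_first_two_nonzero_alt, swapOuterA_char]
  simp only [hB]
  rcases hnz : nzIdx l with _ | ⟨i, _ | ⟨j, rest⟩⟩ <;> rw [hnz] at hA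
  · rw [hA]
    simp
  · obtain ⟨h1, h2⟩ := hA
    simp only [h1, h2]
    simp
  · obtain ⟨h1, h2⟩ := hA
    simp only [h1, h2]
    simp only [List.map_cons, List.length_cons, zero_add]
    rw [if_pos (by omega)]
    simp [pysem]

-- ===== VERDICT (by name: the statement is the Claim_ definition above) =====
theorem swap_first_two_nonzero_spec : Claim_equal_swap_first_two_nonzero := by
  intro l _
  unfold Spec_swap_first_two_nonzero
  exact swap_main l
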